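-- pv_equiv track=rewrite | github.com/nlp-noob/fine-tune-ner | order_extract.py | split_special_word
-- ===== SOURCE A (Python) =====
-- def split_special_word(word):
--     pieces_list = []
--     a_piece = ""
--     special_piece = ""
--     for a_char in word:
--         if a_char.isalnum():
--             if special_piece:
--                 pieces_list.append(special_piece)
--                 special_piece = ""
--             a_piece += a_char
--         else:
--             if a_piece:
--                 pieces_list.append(a_piece)
--                 a_piece = ""
--             special_piece += a_char
--     if a_piece:
--         pieces_list.append(a_piece)
--     if special_piece:
--         pieces_list.append(special_piece)
--     return pieces_list
-- ===== SOURCE B (Python) =====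
-- def split_special_word(word):
--     if not word:
--         return []
--     keys = [c.isalnum() for c in word]
--     cuts = [i + 1 for i, (x, y) in enumerate(zip(keys, keys[1:])) if x != y]
--     bounds = [0] + cuts + [len(word)]
--     return [word[a:b] for a, b in zip(bounds, bounds[1:])]
-- ===== Notes on version B (the rewrite author's own statement) =====
-- stated objective: alternative
-- what changed: Replaces A's single pass with two manually flushed accumulator buffers by a staged computation: a list of isalnum keys, the cut indices where adjacent keys differ (enumerate over zipped neighbours), and a slice of the word between each pair of consecutive bounds.
import Mathlib
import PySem

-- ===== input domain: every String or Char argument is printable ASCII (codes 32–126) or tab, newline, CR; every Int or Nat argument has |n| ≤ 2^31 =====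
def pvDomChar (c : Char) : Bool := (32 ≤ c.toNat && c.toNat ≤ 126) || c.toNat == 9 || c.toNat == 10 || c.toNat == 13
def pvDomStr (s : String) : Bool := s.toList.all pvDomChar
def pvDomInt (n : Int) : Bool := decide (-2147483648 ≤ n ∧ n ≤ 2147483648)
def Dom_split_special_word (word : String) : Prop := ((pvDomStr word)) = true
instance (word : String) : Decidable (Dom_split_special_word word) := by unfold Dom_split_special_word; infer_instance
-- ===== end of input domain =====

-- B replaces A's single pass with two flushed accumulator buffers by a staged
-- computation: a list of isalnum keys, the cut indices where adjacent keys differ,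
-- and a slice of the word between each pair of consecutive bounds; same return value.

-- ===== PORT A =====
-- A's for-loop over word with state (pieces_list, a_piece, special_piece).
def splitLoopA : List Char → List String → String → String → List String
  | [], pieces, aPiece, specialPiece =>
      -- the two trailing flushes after the loop
      let pieces := if aPiece ≠ "" then pieces ++ [aPiece] else pieces
      if specialPiece ≠ "" then pieces ++ [specialPiece] else pieces
  | c :: cs, pieces, aPiece, specialPiece =>
      if PySem.Chars.isalnum c then
        let pieces := if specialPiece ≠ "" then pieces ++ [specialPiece] else pieces
        let specialPiece := if specialPiece ≠ "" then "" else specialPiece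
        splitLoopA cs pieces (aPiece.push c) specialPiece
      else
        let pieces := if aPiece ≠ "" then pieces ++ [aPiece] else pieces
        let aPiece := if aPiece ≠ "" then "" else aPiece
        splitLoopA cs pieces aPiece (specialPiece.push c)

def split_special_word (word : String) : List String :=
  splitLoopA word.toList [] "" ""

-- ===== PORT B =====
-- keys = [c.isalnum() for c in word]; cuts = [i+1 for i,(x,y) in enumerate(zip(keys, keys[1:])) if x != y];
-- bounds = [0] + cuts + [len(word)]; [word[a:b] for a,b in zip(bounds, bounds[1:])]
def split_special_word_alt (word : String) : List String :=
  if word.toList = [] then []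
  else
    let l := word.toList
    let keys := l.map PySem.Chars.isalnum
    let cuts : List Int :=
      ((PySem.List.enumerate (keys.zip keys.tail) 0).filter (fun p => p.2.1 != p.2.2)).map
        (fun p => p.1 + 1)
    let bounds : List Int := 0 :: cuts ++ [(l.length : Int)]
    (bounds.zip bounds.tail).map (fun p => String.ofList (PySem.List.slice l (some p.1) (some p.2)))

-- ===== PRECONDITION & SPEC =====
def Spec_split_special_word (word : String) (out : List String) : Prop := out = split_special_word_alt word
instance (word : String) (out : List String) : Decidable (Spec_split_special_word word out) := by unfold Spec_split_special_word; infer_instance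

-- ===== CLAIM (what is proved, stated in full; the proofs are below) =====
def Claim_equal_split_special_word : Prop := ∀ (word : String), Dom_split_special_word word → Spec_split_special_word word (split_special_word word)

-- ===== LEMMAS AND PROOFS =====

-- The common characterisation both ports are proved equal to: maximal runs of equal isalnum key.
def groupRuns : List Char → List String
  | [] => []
  | c :: cs =>
      String.ofList (c :: cs.takeWhile (fun d => PySem.Chars.isalnum d == PySem.Chars.isalnum c))
        :: groupRuns (cs.dropWhile (fun d => PySem.Chars.isalnum d == PySem.Chars.isalnum c))
  termination_by cs => cs.length
  decreasing_by
    simp only [List.length_cons]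
    exact Nat.lt_succ_of_le (List.length_dropWhile_le _ _)

-- ---- A-side: split_special_word word = groupRuns word.toList ----

-- takeWhile/dropWhile split exactly at the end of a maximal run.
theorem run_split (p : Char → Bool) : ∀ (run cs : List Char), (∀ x ∈ run, p x = true) →
    (match cs with | [] => True | c :: _ => p c = false) →
    (run ++ cs).takeWhile p = run ∧ (run ++ cs).dropWhile p = cs := by
  intro run
  induction run with
  | nil =>
    intro cs _ hcs
    cases cs with
    | nil => simp
    | cons c cs' => simp only at hcs; simp [hcs]
  | cons d run' ih =>
    intro cs hall hcs
    have h := ih cs (fun x hx => hall x (List.mem_cons_of_mem _ hx)) hcs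
    simp [hall d (List.mem_cons_self ..), h.1, h.2]

-- A maximal run (all chars share key b, next char — if any — differs) is one group.
theorem groupRuns_flush (b : Bool) (run : List Char) (hne : run ≠ [])
    (hall : ∀ c ∈ run, PySem.Chars.isalnum c = b) :
    ∀ cs, (match cs with | [] => True | c :: _ => PySem.Chars.isalnum c ≠ b) →
      groupRuns (run ++ cs) = String.ofList run :: groupRuns cs := by
  intro cs hhd
  obtain ⟨d, run', rfl⟩ := List.exists_cons_of_ne_nil hne
  have hd : PySem.Chars.isalnum d = b := hall d (List.mem_cons_self ..)
  have hsplit := run_split (fun x => PySem.Chars.isalnum x == PySem.Chars.isalnum d) run' cs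
    (by intro x hx; simp [hall x (List.mem_cons_of_mem _ hx), hd])
    (by cases cs with
        | nil => trivial
        | cons c cs' => simp only at hhd ⊢; simp [hd]; exact hhd)
  rw [List.cons_append, groupRuns, hsplit.1, hsplit.2]

theorem ofList_ne_empty (l : List Char) (h : l ≠ []) : String.ofList l ≠ "" := by simp [h]

theorem ofList_push (l : List Char) (c : Char) :
    (String.ofList l).push c = String.ofList (l ++ [c]) :=
  String.toList_inj.mp (by simp)

-- Main A invariant: with exactly one nonempty buffer holding run (key b throughout),
-- the loop produces pieces ++ the groups of run ++ cs.
theorem splitLoopA_eq (cs : List Char) : ∀ (pieces : List String) (b : Bool) (run : List Char),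
    run ≠ [] → (∀ c ∈ run, PySem.Chars.isalnum c = b) →
    splitLoopA cs pieces (if b then String.ofList run else "") (if b then "" else String.ofList run)
      = pieces ++ groupRuns (run ++ cs) := by
  induction cs with
  | nil =>
    intro pieces b run hne hall
    have hmk := ofList_ne_empty run hne
    have hgr : groupRuns run = [String.ofList run] := by
      have h2 := groupRuns_flush b run hne hall [] trivial
      simpa [groupRuns] using h2
    cases b <;> simp [splitLoopA, hmk, hgr]
  | cons c cs ih =>
    intro pieces b run hne hall
    have hmk := ofList_ne_empty run hne
    by_cases hc : PySem.Chars.isalnum c = b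
    · -- same key: buffer extends, same group continues
      have hall' : ∀ x ∈ run ++ [c], PySem.Chars.isalnum x = b := by
        intro x hx; rcases List.mem_append.1 hx with h | h
        · exact hall x h
        · simp at h; subst h; exact hc
      have key := ih pieces b (run ++ [c]) (by simp) hall'
      cases b with
      | true =>
        try simp only [Bool.false_eq_true, reduceIte] at key ⊢
        rw [splitLoopA]
        simp only [hc, reduceIte, ne_eq, not_true_eq_false, ite_false, ite_self]
        rw [ofList_push, key]
        simp [List.append_assoc]
      | false =>
        have hcf : PySem.Chars.isalnum c = false := hc
        try simp only [Bool.false_eq_true, reduceIte] at key ⊢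
        rw [splitLoopA]
        simp only [hcf, Bool.false_eq_true, reduceIte, ne_eq, eq_self_iff_true, not_true,
          ite_false, ite_self]
        rw [ofList_push, key]
        simp [List.append_assoc]
    · -- key changes: buffer flushes (one group closes), new buffer [c]
      have hflush := groupRuns_flush b run hne hall (c :: cs) (by simp only; exact hc)
      have key := ih (pieces ++ [String.ofList run]) (!b) [c]
        (by simp) (by intro x hx; simp at hx; subst hx; cases b <;> simp_all)
      cases b with
      | true =>
        have hcf : PySem.Chars.isalnum c = false := by simpa using hc
        try simp only [Bool.not_true, Bool.false_eq_true, reduceIte] at key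
        rw [splitLoopA]
        simp only [hcf, Bool.false_eq_true, reduceIte, ne_eq, hmk, not_false_eq_true, ite_true,
          ite_false]
        have hp : ("" : String).push c = String.ofList [c] := rfl
        simp only [List.singleton_append] at key
        rw [hp, key, hflush]
        simp
      | false =>
        have hct : PySem.Chars.isalnum c = true := by
          cases h : PySem.Chars.isalnum c
          · exact absurd h hc
          · rfl
        try simp only [Bool.not_false, Bool.false_eq_true, reduceIte] at key
        rw [splitLoopA]
        simp only [hct, Bool.false_eq_true, reduceIte, ne_eq, hmk, not_false_eq_true, ite_true]
        have hp : ("" : String).push c = String.ofList [c] := rfl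
        simp only [List.singleton_append] at key
        rw [hp, key, hflush]
        simp

theorem portA_eq_groupRuns (word : String) : split_special_word word = groupRuns word.toList := by
  unfold split_special_word
  cases h : word.toList with
  | nil => simp [splitLoopA, groupRuns]
  | cons c cs =>
    rw [splitLoopA]
    have hp : ("" : String).push c = String.ofList [c] := rfl
    by_cases hc : PySem.Chars.isalnum c = true
    · simp only [hc, reduceIte, ne_eq, not_true_eq_false, ite_false, ite_self]
      rw [hp]
      have key := splitLoopA_eq cs [] true [c] (by simp)
        (by intro x hx; simp at hx; subst hx; exact hc)
      try simp only [Bool.false_eq_true, reduceIte] at key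
      simpa using key
    · have hcf : PySem.Chars.isalnum c = false := by
        cases h2 : PySem.Chars.isalnum c
        · rfl
        · exact absurd h2 hc
      simp only [hcf, Bool.false_eq_true, ne_eq, not_true_eq_false, ite_false, ite_self]
      rw [hp]
      have key := splitLoopA_eq cs [] false [c] (by simp)
        (by intro x hx; simp at hx; subst hx; exact hcf)
      try simp only [Bool.false_eq_true, reduceIte] at key
      simpa using key

-- ---- B-side: split_special_word_alt word = groupRuns word.toList ----

-- Recursive characterisation of B's cut-index list over the key list.
def cutsF : List Bool → List Int
  | [] => []
  | [_] => []
  | x :: y :: ys => (if x != y then [(1 : Int)] else []) ++ (cutsF (y :: ys)).map (· + 1)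

theorem cuts_eq_cutsF : ∀ (keys : List Bool) (s : Int),
    ((PySem.List.enumerate (keys.zip keys.tail) s).filter (fun p => p.2.1 != p.2.2)).map
        (fun p => p.1 + 1)
      = (cutsF keys).map (· + s) := by
  intro keys
  induction keys with
  | nil => intro s; simp [cutsF, PySem.List.enumerate_nil]
  | cons x ys ih =>
    intro s
    cases ys with
    | nil => simp [cutsF, PySem.List.enumerate_nil]
    | cons y ys' =>
      have key := ih (s + 1)
      simp only [List.tail_cons] at key
      simp only [List.tail_cons, List.zip_cons_cons, PySem.List.enumerate_cons, List.filter_cons,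
        cutsF]
      by_cases hxy : (x != y) = true
      · simp only [hxy, if_true, List.map_cons, List.singleton_append, List.map_map]
        rw [key]
        congr 1
        · omega
        · exact List.map_congr_left (fun z _ => by simp; omega)
      · simp only [hxy, Bool.false_eq_true, if_false, List.nil_append]
        rw [key, List.map_map]
        exact List.map_congr_left (fun z _ => by simp; omega)

theorem cutsF_pos : ∀ keys, ∀ x ∈ cutsF keys, 1 ≤ x := by
  intro keys
  induction keys with
  | nil => simp [cutsF]
  | cons a ys ih =>
    cases ys with
    | nil => simp [cutsF]
    | cons b ys' =>
      intro x hx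
      simp only [cutsF, List.mem_append, List.mem_map] at hx
      rcases hx with h | ⟨z, hz, rfl⟩
      · split at h <;> simp_all
      · have := ih z hz; omega

-- cutsF on a leading maximal run: one cut after the run, then the cuts of the rest shifted.
theorem cutsF_run (b : Bool) : ∀ (run d : List Bool), run ≠ [] → (∀ x ∈ run, x = b) →
    (∀ y, d.head? = some y → y ≠ b) →
    cutsF (run ++ d)
      = if d = [] then [] else (run.length : Int) :: (cutsF d).map (· + run.length) := by
  intro run
  induction run with
  | nil => intro d h; exact absurd rfl h
  | cons x run' ih =>
    intro d _ hall hhd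
    have hx : x = b := hall x (List.mem_cons_self ..)
    cases run' with
    | nil =>
      cases d with
      | nil => simp [cutsF]
      | cons y ys =>
        have hy : y ≠ b := hhd y rfl
        have hxy : (x != y) = true := by subst hx; simp [bne]; exact fun h => hy h.symm
        simp [cutsF, hxy]
    | cons x' run'' =>
      have hx' : x' = b := hall x' (by simp)
      have key := ih d (by simp) (fun z hz => hall z (List.mem_cons_of_mem _ hz)) hhd
      have hxx' : (x != x') = false := by subst hx hx'; simp
      simp only [List.cons_append] at key ⊢
      rw [cutsF, hxx', key]
      by_cases hd : d = []
      · simp [hd]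
      · simp only [hd, if_false, List.map_cons, List.map_map, Bool.false_eq_true,
          List.nil_append]
        refine List.cons_eq_cons.mpr ⟨by simp, ?_⟩
        exact List.map_congr_left (fun z _ => by simp; omega)


-- slicing with bounds shifted by the length of a dropped prefix
theorem slice_shift (run d : List Char) (a c : Int) (ha : 0 ≤ a) (hc : 0 ≤ c) :
    PySem.List.slice (run ++ d) (some (a + run.length)) (some (c + run.length))
      = PySem.List.slice d (some a) (some c) := by
  rw [PySem.List.slice_toNat _ (by omega) (by omega), PySem.List.slice_toNat _ ha hc]
  have h1 : (a + run.length).toNat = run.length + a.toNat := by omega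
  have h2 : (c + run.length).toNat = run.length + c.toNat := by omega
  rw [h1, h2, List.drop_append, List.drop_eq_nil_of_le (by omega), List.nil_append]
  congr 1
  · omega
  · congr 1; omega

theorem pairs_shift (run d : List Char) : ∀ bounds : List Int, (∀ x ∈ bounds, 0 ≤ x) →
    (((bounds.map (· + (run.length : Int))).zip (bounds.map (· + (run.length : Int))).tail).map
        (fun p => String.ofList (PySem.List.slice (run ++ d) (some p.1) (some p.2))))
      = (bounds.zip bounds.tail).map
          (fun p => String.ofList (PySem.List.slice d (some p.1) (some p.2))) := by
  intro bounds
  induction bounds with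
  | nil => simp
  | cons a bs ih =>
    intro hpos
    cases bs with
    | nil => simp
    | cons c bs' =>
      have ha := hpos a (by simp)
      have hc := hpos c (by simp)
      simp only [List.map_cons, List.tail_cons, List.zip_cons_cons, List.map_cons]
      rw [slice_shift run d a c ha hc]
      have := ih (fun x hx => hpos x (List.mem_cons_of_mem _ hx))
      simp only [List.map_cons, List.tail_cons] at this
      rw [this]

-- B's staged computation on a raw character list.
def altCore (l : List Char) : List String :=
  let keys := l.map PySem.Chars.isalnum
  let cuts : List Int :=
    ((PySem.List.enumerate (keys.zip keys.tail) 0).filter (fun p => p.2.1 != p.2.2)).map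
      (fun p => p.1 + 1)
  let bounds : List Int := 0 :: cuts ++ [(l.length : Int)]
  (bounds.zip bounds.tail).map (fun p => String.ofList (PySem.List.slice l (some p.1) (some p.2)))

-- B's cut list over the key list, with the +0 shift removed.
theorem cuts_eq_cutsF_zero (keys : List Bool) :
    ((PySem.List.enumerate (keys.zip keys.tail) 0).filter (fun p => p.2.1 != p.2.2)).map
        (fun p => p.1 + 1) = cutsF keys := by
  rw [cuts_eq_cutsF keys 0]
  exact (List.map_congr_left (fun z _ => by simp)).trans (List.map_id _)

theorem altCore_def' (l : List Char) :
    altCore l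
      = ((0 :: cutsF (l.map PySem.Chars.isalnum) ++ [(l.length : Int)]).zip
            (0 :: cutsF (l.map PySem.Chars.isalnum) ++ [(l.length : Int)]).tail).map
          (fun p => String.ofList (PySem.List.slice l (some p.1) (some p.2))) := by
  unfold altCore
  simp only [cuts_eq_cutsF_zero]

-- the cut indices of a list headed by a maximal run: one cut after the run, then the rest shifted
theorem altCore_cons (c : Char) (t d : List Char)
    (hallt : ∀ x ∈ c :: t, PySem.Chars.isalnum x = PySem.Chars.isalnum c)
    (hhd : ∀ y, d.head? = some y → PySem.Chars.isalnum y ≠ PySem.Chars.isalnum c)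
    (hIH : d ≠ [] → altCore d = groupRuns d) :
    altCore (c :: (t ++ d)) = String.ofList (c :: t) :: groupRuns d := by
  have hallk : ∀ x ∈ (c :: t).map PySem.Chars.isalnum, x = PySem.Chars.isalnum c := by
    intro x hx
    obtain ⟨z, hz, rfl⟩ := List.mem_map.1 hx
    exact hallt z hz
  have hhk : ∀ y, (d.map PySem.Chars.isalnum).head? = some y → y ≠ PySem.Chars.isalnum c := by
    intro y hy
    rw [List.head?_map] at hy
    cases hde : d.head? with
    | none => rw [hde] at hy; simp at hy
    | some e =>
      rw [hde] at hy
      simp only [Option.map_some, Option.some.injEq] at hy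
      subst hy
      exact hhd e hde
  have hcuts := cutsF_run (PySem.Chars.isalnum c) ((c :: t).map PySem.Chars.isalnum)
    (d.map PySem.Chars.isalnum) (by simp) hallk hhk
  have hkeys : (c :: (t ++ d)).map PySem.Chars.isalnum
      = ((c :: t).map PySem.Chars.isalnum) ++ d.map PySem.Chars.isalnum := by simp
  rw [altCore_def', hkeys, hcuts]
  by_cases hdnil : d = []
  · subst hdnil
    simp only [List.map_nil, if_true, List.append_nil, List.nil_append, List.cons_append,
      List.zip_cons_cons, List.tail_cons, List.zip_nil_right, List.map_cons, List.map_nil,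
      groupRuns]
    rw [PySem.List.slice_toNat (c :: t) (by omega) (by omega)]
    simp
  · have hm : ((c :: t).map PySem.Chars.isalnum).length = t.length + 1 := by simp
    simp only [List.map_eq_nil_iff, hdnil, if_false, hm]
    have hpos : ∀ x ∈ (0 : Int) :: cutsF (d.map PySem.Chars.isalnum) ++ [(d.length : Int)], 0 ≤ x := by
      intro x hx
      rcases List.mem_cons.1 hx with rfl | hx
      · omega
      · rcases List.mem_append.1 hx with hx | hx
        · have := cutsF_pos _ x hx; omega
        · simp at hx; omega
    have hshift :
        ((t.length + 1 : Nat) : Int)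
            :: ((cutsF (d.map PySem.Chars.isalnum)).map (· + ((t.length + 1 : Nat) : Int))
                ++ [((c :: (t ++ d)).length : Int)])
          = ((0 : Int) :: cutsF (d.map PySem.Chars.isalnum) ++ [(d.length : Int)]).map
              (· + ((c :: t).length : Int)) := by
      simp only [List.cons_append, List.map_cons, List.map_append, List.map_nil]
      refine List.cons_eq_cons.mpr ⟨by simp, ?_⟩
      refine congrArg₂ (· ++ ·) ?_ ?_
      · exact (List.map_congr_left (fun z _ => by simp)).symm
      · simp only [List.cons.injEq, and_true, List.length_cons, List.length_append]
        push_cast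
        omega
    simp only [List.cons_append] at hshift ⊢
    rw [← hIH hdnil, altCore_def' d, hshift]
    have hps := pairs_shift (c :: t) d
      ((0 : Int) :: cutsF (d.map PySem.Chars.isalnum) ++ [(d.length : Int)]) hpos
    simp only [List.map_cons, List.zip_cons_cons, List.tail_cons] at hps ⊢
    refine List.cons_eq_cons.mpr ⟨?_, hps⟩
    congr 1
    rw [show (0 : Int) + ((c :: t).length : Int) = ((c :: t).length : Int) from by omega]
    rw [PySem.List.slice_toNat _ (by omega) (by omega), ← List.cons_append]
    simp

theorem altCore_eq_groupRuns : ∀ (l : List Char), l ≠ [] → altCore l = groupRuns l := by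
  intro l
  induction l using groupRuns.induct with
  | case1 => intro h; exact absurd rfl h
  | case2 c rest IH =>
  intro _
  have htd : rest.takeWhile (fun x => PySem.Chars.isalnum x == PySem.Chars.isalnum c)
      ++ rest.dropWhile (fun x => PySem.Chars.isalnum x == PySem.Chars.isalnum c) = rest :=
    List.takeWhile_append_dropWhile
  have hgr : groupRuns (c :: rest)
      = String.ofList (c :: rest.takeWhile (fun x => PySem.Chars.isalnum x == PySem.Chars.isalnum c))
        :: groupRuns (rest.dropWhile (fun x => PySem.Chars.isalnum x == PySem.Chars.isalnum c)) := by
    rw [groupRuns]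
  have hmain := altCore_cons c
    (rest.takeWhile (fun x => PySem.Chars.isalnum x == PySem.Chars.isalnum c))
    (rest.dropWhile (fun x => PySem.Chars.isalnum x == PySem.Chars.isalnum c))
    (by
      intro x hx
      rcases List.mem_cons.1 hx with rfl | hx
      · rfl
      · have := List.mem_takeWhile_imp hx
        simpa using this)
    (by
      intro y hy
      have := List.head?_dropWhile_not
        (fun x => PySem.Chars.isalnum x == PySem.Chars.isalnum c) rest
      rw [hy] at this
      simpa using this)
    IH
  rw [htd] at hmain
  rw [hmain, hgr]

theorem portB_eq_groupRuns (word : String) : split_special_word_alt word = groupRuns word.toList := by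
  unfold split_special_word_alt
  by_cases h : word.toList = []
  · simp [h, groupRuns]
  · simp only [h, if_false]
    exact altCore_eq_groupRuns word.toList h

-- ===== VERDICT (by name: the statement is the Claim_ definition above) =====
theorem split_special_word_spec : Claim_equal_split_special_word := by
  intro word _
  unfold Spec_split_special_word
  rw [portA_eq_groupRuns, portB_eq_groupRuns]
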